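-- pv_equiv track=rewrite | github.com/ue8gc0t/Py_Study | Py_HW/Less_8_HW/HW_1.py | chek_answer
-- ===== SOURCE A (Python) =====
-- def chek_answer(card, num):
--     result = False
--     for i in range(0, len(card)):
--         for j in range(0, len(card[i])):
--             if card[i][j] == num:
--                 card[i][j] = 128
--                 result = True
--     return result
-- ===== SOURCE B (Python) =====
-- def chek_answer(card, num):
--     # Two separate passes: detect with a full scan, then mutate matching cells in place.
--     found = any(cell == num for row in card for cell in row)
--     for row in card:
--         for j in range(len(row)):
--             if row[j] == num:
--                 row[j] = 128
--     return found
-- ===== Notes on version B (the rewrite author's own statement) =====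
-- stated objective: simpler
-- what changed: A computes the result inside one combined scan-and-mutate nested index loop over a mutating grid; B splits it into two differently-shaped passes: a pure any() scan over cells to get the result, then a separate in-place mutation loop, so the returned value is a plain generator expression.
import Mathlib
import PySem

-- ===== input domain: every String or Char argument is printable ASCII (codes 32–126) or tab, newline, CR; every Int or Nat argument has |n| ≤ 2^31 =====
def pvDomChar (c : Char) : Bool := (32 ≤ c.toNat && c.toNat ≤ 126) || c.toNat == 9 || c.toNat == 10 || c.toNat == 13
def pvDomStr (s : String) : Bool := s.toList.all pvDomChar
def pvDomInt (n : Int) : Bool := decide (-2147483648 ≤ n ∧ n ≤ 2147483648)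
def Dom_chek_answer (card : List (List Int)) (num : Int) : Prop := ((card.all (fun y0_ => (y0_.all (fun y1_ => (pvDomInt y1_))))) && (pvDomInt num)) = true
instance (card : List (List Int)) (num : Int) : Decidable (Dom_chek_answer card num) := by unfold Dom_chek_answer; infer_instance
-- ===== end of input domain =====

-- B computes the result with a pure any() scan and does the in-place mutation in a separate
-- second pass (the mutation does not affect the return value; the Lean ports model the return
-- value only — both Pythons perform the same in-place mutation of `card`).

-- ===== PORT A =====
-- inner loop body: 'if card[i][j] == num: card[i][j] = 128; result = True'
def pvInnerStep (num : Int) (i : Int) (st : List (List Int) × Bool) (j : Int) : List (List Int) × Bool :=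
  if PySem.List.pyGetD (PySem.List.pyGetD st.1 i []) j 0 = num then
    (PySem.List.pySetD st.1 i (PySem.List.pySetD (PySem.List.pyGetD st.1 i []) j 128), true)
  else st

-- outer loop body: 'for j in range(0, len(card[i])): …'
def pvOuterStep (num : Int) (st : List (List Int) × Bool) (i : Int) : List (List Int) × Bool :=
  (PySem.List.pyRange 0 ((PySem.List.pyGetD st.1 i []).length : Int) 1).foldl (pvInnerStep num i) st

def chek_answer (card : List (List Int)) (num : Int) : Bool :=
  ((PySem.List.pyRange 0 (card.length : Int) 1).foldl (pvOuterStep num) (card, false)).2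

-- ===== PORT B =====
-- 'found = any(cell == num for row in card for cell in row)'; the subsequent mutation pass
-- of Source B changes no cell to a value that alters the return, which is computed before it.
def chek_answer_alt (card : List (List Int)) (num : Int) : Bool :=
  card.any (fun row => row.any (fun cell => cell == num))

-- ===== PRECONDITION & SPEC =====
def Spec_chek_answer (card : List (List Int)) (num : Int) (out : Bool) : Prop := out = chek_answer_alt card num
instance (card : List (List Int)) (num : Int) (out : Bool) : Decidable (Spec_chek_answer card num out) := by unfold Spec_chek_answer; infer_instance

-- ===== CLAIM (what is proved, stated in full; the proofs are below) =====
def Claim_equal_chek_answer : Prop := ∀ (card : List (List Int)) (num : Int), Dom_chek_answer card num → Spec_chek_answer card num (chek_answer card num)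

-- ===== LEMMAS AND PROOFS =====

-- The inner loop, started at column a with the row suffix from a equal to t, ORs into the
-- accumulator exactly 'some element of t equals num'; it changes only row n of the grid.
lemma pvInnerAux (num : Int) (n : Nat) :
    ∀ (t : List Int) (a : Nat) (c : List (List Int)) (r : Bool),
      (c.getD n []).drop a = t →
      (((PySem.List.pyRange (a : Int) ((a : Int) + t.length) 1).foldl (pvInnerStep num (n : Int)) (c, r)).2
          = (r || t.any (· == num))
        ∧ ((PySem.List.pyRange (a : Int) ((a : Int) + t.length) 1).foldl (pvInnerStep num (n : Int)) (c, r)).1.length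
          = c.length
        ∧ ∀ m : Nat, n < m →
          (((PySem.List.pyRange (a : Int) ((a : Int) + t.length) 1).foldl (pvInnerStep num (n : Int)) (c, r)).1).drop m
            = c.drop m) := by
  intro t
  induction t with
  | nil =>
      intro a c r _
      simp [PySem.List.pyRange_one_eq_nil]
  | cons x t ih =>
      intro a c r hdrop
      have ha : a < (c.getD n []).length := by
        by_contra h
        rw [Nat.not_lt] at h
        rw [List.drop_eq_nil_of_le h] at hdrop
        exact List.cons_ne_nil x t hdrop.symm
      have hx : (c.getD n [])[a]'ha = x := by
        have h0 := congrArg (fun l : List Int => l[0]?) hdrop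
        simp only [List.getElem?_drop, Nat.add_zero, List.getElem?_cons_zero] at h0
        rw [List.getElem?_eq_getElem ha] at h0
        exact Option.some.inj h0
      have hcons : PySem.List.pyRange (a : Int) ((a : Int) + (x :: t).length) 1
          = (a : Int) :: PySem.List.pyRange ((a : Int) + 1) ((a : Int) + (x :: t).length) 1 := by
        exact PySem.List.pyRange_one_cons (by push_cast [List.length_cons]; omega)
      rw [hcons, List.foldl_cons]
      have hval : PySem.List.pyGetD (PySem.List.pyGetD c (n : Int) []) (a : Int) 0 = x := by
        have hg : (c.getD n []).getD a 0 = x := by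
          rw [List.getD_eq_getElem?_getD, List.getElem?_eq_getElem ha]
          simpa using hx
        simpa [PySem.List.pyGetD_natCast] using hg
      by_cases hc : x = num
      · -- the cell matches: set it to 128, result becomes true
        have hstep : pvInnerStep num (n : Int) (c, r) (a : Int)
            = (c.set n ((c.getD n []).set a 128), true) := by
          rw [pvInnerStep, if_pos (by simpa [hc] using hval)]
          simp [PySem.List.pySetD_natCast, PySem.List.pyGetD_natCast]
        rw [hstep]
        have hdrop' : ((c.set n ((c.getD n []).set a 128)).getD n []).drop (a + 1) = t := by
          by_cases hn : n < c.length
          · rw [List.getD_eq_getElem?_getD, List.getElem?_set_self (by simpa using hn)]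
            simp only [Option.getD_some]
            have : ((c.getD n []).set a 128).drop (a + 1) = (c.getD n []).drop (a + 1) := by
              apply List.drop_set_of_lt
              omega
            rw [List.getD_eq_getElem?_getD, List.getElem?_eq_getElem hn] at *
            simp only [Option.getD_some] at *
            rw [this]
            have := congrArg List.tail hdrop
            simpa [List.tail_drop] using this
          · exfalso
            have : c.getD n [] = [] := by
              rw [List.getD_eq_getElem?_getD, List.getElem?_eq_none (by omega)]
              rfl
            rw [this] at ha; simp at ha
        have hrange : ((a : Int) + 1) = (((a + 1 : Nat)) : Int) := by push_cast [List.length_cons]; ring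
        have hlen : ((a : Int) + (x :: t).length) = (((a + 1 : Nat)) : Int) + t.length := by
          push_cast [List.length_cons]; ring
        rw [hrange, hlen]
        obtain ⟨h1, h2, h3⟩ := ih (a + 1) (c.set n ((c.getD n []).set a 128)) true hdrop'
        refine ⟨by simpa [hc] using h1, by simpa using h2, ?_⟩
        intro m hm
        rw [h3 m hm]
        apply List.drop_set_of_lt
        omega
      · -- no match: state unchanged
        have hstep : pvInnerStep num (n : Int) (c, r) (a : Int) = (c, r) := by
          rw [pvInnerStep, if_neg (by rw [hval]; exact hc)]
        rw [hstep]
        have hdrop' : (c.getD n []).drop (a + 1) = t := by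
          have := congrArg List.tail hdrop
          simpa [List.tail_drop] using this
        have hrange : ((a : Int) + 1) = (((a + 1 : Nat)) : Int) := by push_cast [List.length_cons]; ring
        have hlen : ((a : Int) + (x :: t).length) = (((a + 1 : Nat)) : Int) + t.length := by
          push_cast [List.length_cons]; ring
        rw [hrange, hlen]
        obtain ⟨h1, h2, h3⟩ := ih (a + 1) c r hdrop'
        refine ⟨?_, h2, h3⟩
        rw [h1]
        have : (x == num) = false := by simp [hc]
        simp [this]

-- The outer loop, started at row a with the grid suffix from a equal to rows, ORs into the
-- accumulator exactly 'some cell of rows equals num'.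
lemma pvOuterAux (num : Int) :
    ∀ (rows : List (List Int)) (a : Nat) (c : List (List Int)) (r : Bool),
      c.length = a + rows.length →
      c.drop a = rows →
      ((PySem.List.pyRange (a : Int) ((a : Int) + rows.length) 1).foldl (pvOuterStep num) (c, r)).2
        = (r || rows.any (fun row => row.any (· == num))) := by
  intro rows
  induction rows with
  | nil =>
      intro a c r _ _
      simp [PySem.List.pyRange_one_eq_nil]
  | cons row rest ih =>
      intro a c r hlen hdrop
      have ha : a < c.length := by simp at hlen; omega
      have hrow : c.getD a [] = row := by
        have h0 := congrArg (fun l : List (List Int) => l[0]?) hdrop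
        simp only [List.getElem?_drop, Nat.add_zero, List.getElem?_cons_zero] at h0
        rw [List.getD_eq_getElem?_getD, h0]
        rfl
      have hcons : PySem.List.pyRange (a : Int) ((a : Int) + (row :: rest).length) 1
          = (a : Int) :: PySem.List.pyRange ((a : Int) + 1) ((a : Int) + (row :: rest).length) 1 := by
        exact PySem.List.pyRange_one_cons (by push_cast [List.length_cons]; omega)
      rw [hcons, List.foldl_cons]
      -- one outer step is the full inner loop on row a
      have hinner := pvInnerAux num a row 0 c r (by simpa using hrow)
      have hrangeeq : PySem.List.pyRange 0 ((PySem.List.pyGetD c (a : Int) []).length : Int) 1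
          = PySem.List.pyRange ((0 : Nat) : Int) (((0 : Nat) : Int) + row.length) 1 := by
        rw [PySem.List.pyGetD_natCast, hrow]
        norm_num
      have hstep : pvOuterStep num (c, r) (a : Int)
          = (PySem.List.pyRange ((0 : Nat) : Int) (((0 : Nat) : Int) + row.length) 1).foldl
              (pvInnerStep num (a : Int)) (c, r) := by
        rw [pvOuterStep, hrangeeq]
      obtain ⟨h1, h2, h3⟩ := hinner
      set st := (PySem.List.pyRange ((0 : Nat) : Int) (((0 : Nat) : Int) + row.length) 1).foldl
        (pvInnerStep num (a : Int)) (c, r) with hst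
      have hrange : ((a : Int) + 1) = (((a + 1 : Nat)) : Int) := by push_cast [List.length_cons]; ring
      have hlen2 : ((a : Int) + (row :: rest).length) = (((a + 1 : Nat)) : Int) + rest.length := by
        push_cast [List.length_cons]; ring
      rw [hstep, hrange, hlen2]
      have := ih (a + 1) st.1 st.2
        (by rw [h2]; simp at hlen ⊢; omega)
        (by rw [h3 (a + 1) (by omega)]
            have := congrArg List.tail hdrop
            simpa [List.tail_drop] using this)
      rw [show ((st.1, st.2) : List (List Int) × Bool) = st from rfl] at this
      rw [this, h1]
      simp [Bool.or_assoc]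

-- ===== VERDICT (by name: the statement is the Claim_ definition above) =====
theorem chek_answer_spec : Claim_equal_chek_answer := by
  intro card num _
  unfold Spec_chek_answer chek_answer chek_answer_alt
  have := pvOuterAux num card 0 card false (by simp) (by simp)
  simpa using this
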